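-- pv_equiv track=rewrite | github.com/Asphyksia/OpenCoder | opencoder/core/aider_bridge.py | _extract_diffs
-- ===== SOURCE A (Python) =====
-- def _extract_diffs(output: str) -> str:
--     """Extrae los diffs del output de Aider."""
--     diffs = []
--     in_diff = False
--     current_diff = []
--
--     for line in output.split("\n"):
--         if line.startswith("diff --git"):
--             if current_diff:
--                 diffs.append("\n".join(current_diff))
--             current_diff = [line]
--             in_diff = True
--         elif in_diff:
--             if line.startswith("diff --git"):
--                 diffs.append("\n".join(current_diff))
--                 current_diff = [line]
--             else:
--                 current_diff.append(line)
--
--     if current_diff: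
--         diffs.append("\n".join(current_diff))
--
--     return "\n\n".join(diffs)
-- ===== SOURCE B (Python) =====
-- def _extract_diffs(output: str) -> str:
--     """Extrae los diffs del output de Aider."""
--     lines = output.split("\n")
--     starts = [i for i, line in enumerate(lines) if line.startswith("diff --git")]
--     bounds = starts + [len(lines)]
--     blocks = ["\n".join(lines[s:e]) for s, e in zip(bounds, bounds[1:])]
--     return "\n\n".join(blocks)
-- ===== Notes on version B (the rewrite author's own statement) =====
-- stated objective: alternative
-- what changed: Replaces A's stateful single-pass accumulator (an in-diff flag, a current block, flush on the next marker and a final flush) with an index-table pass: collect the positions of the diff-header marker lines once, then slice the line list between consecutive start positions and join the slices.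
import Mathlib
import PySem

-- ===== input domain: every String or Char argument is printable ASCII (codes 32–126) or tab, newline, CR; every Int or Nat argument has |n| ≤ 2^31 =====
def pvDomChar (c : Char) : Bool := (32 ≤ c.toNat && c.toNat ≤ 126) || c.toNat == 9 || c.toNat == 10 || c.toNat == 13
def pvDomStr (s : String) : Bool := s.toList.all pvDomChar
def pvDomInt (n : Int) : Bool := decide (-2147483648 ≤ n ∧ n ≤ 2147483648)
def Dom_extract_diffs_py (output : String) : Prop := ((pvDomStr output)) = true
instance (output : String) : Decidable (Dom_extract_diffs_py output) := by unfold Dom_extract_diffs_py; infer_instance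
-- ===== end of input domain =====

-- B replaces A's stateful accumulator loop (in_diff flag, current block, flush on marker /
-- at end) with an index table of 'diff --git' line positions followed by slicing between
-- consecutive starts (alternative decomposition, same value).

-- ===== PORT A =====
-- line.startswith("diff --git")
def pvLineP (line : String) : Bool := PySem.Str.startswith line "diff --git"

-- output.split("\n")  (shared by both ports)
def pvLines (output : String) : List String :=
  (PySem.Chars.splitOn output.toList ['\n']).map String.ofList

-- one iteration of A's for-loop over the state (diffs, in_diff, current_diff)
def pvStep (st : List String × Bool × List String) (line : String) :
    List String × Bool × List String :=
  if pvLineP line then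
    ((if st.2.2 ≠ [] then st.1 ++ [PySem.Str.join "\n" st.2.2] else st.1), true, [line])
  else if st.2.1 then
    (if pvLineP line then
      (st.1 ++ [PySem.Str.join "\n" st.2.2], st.2.1, [line])
     else
      (st.1, st.2.1, st.2.2 ++ [line]))
  else st

-- A's trailing 'if current_diff: diffs.append("\n".join(current_diff))'
def pvFlush (r : List String × Bool × List String) : List String :=
  if r.2.2 ≠ [] then r.1 ++ [PySem.Str.join "\n" r.2.2] else r.1

def extract_diffs_py (output : String) : String :=
  PySem.Str.join "\n\n" (pvFlush ((pvLines output).foldl pvStep ([], false, [])))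

-- ===== PORT B =====
-- [i for i, line in enumerate(lines) if line.startswith("diff --git")]
def pvStarts (lines : List String) : List Int :=
  ((PySem.List.enumerate lines).filter (fun q => pvLineP q.2)).map (·.1)

-- starts + [len(lines)]
def pvBounds (lines : List String) : List Int :=
  pvStarts lines ++ [PySem.List.len lines]

def extract_diffs_py_alt (output : String) : String :=
  PySem.Str.join "\n\n"
    (((pvBounds (pvLines output)).zip
        (PySem.List.slice (pvBounds (pvLines output)) (some 1) none)).map
      (fun q => PySem.Str.join "\n"
        (PySem.List.slice (pvLines output) (some q.1) (some q.2))))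

-- ===== PRECONDITION & SPEC =====
def Spec_extract_diffs_py (output : String) (out : String) : Prop := out = extract_diffs_py_alt output
instance (output : String) (out : String) : Decidable (Spec_extract_diffs_py output out) := by unfold Spec_extract_diffs_py; infer_instance

-- ===== CLAIM (what is proved, stated in full; the proofs are below) =====
def Claim_equal_extract_diffs_py : Prop := ∀ (output : String), Dom_extract_diffs_py output → Spec_extract_diffs_py output (extract_diffs_py output)

-- ===== LEMMAS AND PROOFS =====

-- the blocks of a line list: maximal runs each begun by a marker line, with the prefix
-- before the first marker dropped — the common characterisation both ports reduce to
def specBlocksFrom (cur : List String) : List String → List (List String)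
  | [] => [cur]
  | l :: ls => if pvLineP l then cur :: specBlocksFrom [l] ls else specBlocksFrom (cur ++ [l]) ls

def specBlocks : List String → List (List String)
  | [] => []
  | l :: ls => if pvLineP l then specBlocksFrom [l] ls else specBlocks ls

-- Nat-valued counterparts of B's start/bound index tables
def natStarts : List String → List Nat
  | [] => []
  | l :: ls => if pvLineP l then 0 :: (natStarts ls).map (· + 1) else (natStarts ls).map (· + 1)

def natBounds (lines : List String) : List Nat := natStarts lines ++ [lines.length]

def natChunks (lines : List String) : List (List String) :=
  ((natBounds lines).zip (natBounds lines).tail).map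
    (fun q => (lines.drop q.1).take (q.2 - q.1))

-- first bound: position of the first marker, or the length if there is none
def natH0 (ls : List String) : Nat := (natStarts ls).headD ls.length

lemma zip_tail_map {α β : Type} (f : α → β) (xs : List α) :
    ((xs.map f).zip (xs.map f).tail) = (xs.zip xs.tail).map (fun q => (f q.1, f q.2)) := by
  cases xs with
  | nil => simp
  | cons x t =>
    rw [List.map_cons, List.tail_cons, ← List.map_cons, List.zip_map]
    rfl

lemma chunk_shift (l : String) (ls : List String) (pairs : List (Nat × Nat)) :
    (pairs.map (fun q => ((q.1 + 1 : Nat), (q.2 + 1 : Nat)))).map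
        (fun q => ((l :: ls).drop q.1).take (q.2 - q.1))
      = pairs.map (fun q => (ls.drop q.1).take (q.2 - q.1)) := by
  rw [List.map_map]
  refine List.map_congr_left fun q _ => ?_
  simp [Nat.add_sub_add_right]

lemma natChunks_cons_neg (l : String) (ls : List String) (h : ¬ pvLineP l = true) :
    natChunks (l :: ls) = natChunks ls := by
  have hb : natBounds (l :: ls) = (natBounds ls).map (· + 1) := by
    simp [natBounds, natStarts, h]
  unfold natChunks
  rw [hb, zip_tail_map, chunk_shift]

lemma natChunks_cons_pos (l : String) (ls : List String) (h : pvLineP l = true) :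
    natChunks (l :: ls) = (l :: ls.take (natH0 ls)) :: natChunks ls := by
  have hb : natBounds (l :: ls) = 0 :: (natBounds ls).map (· + 1) := by
    simp [natBounds, natStarts, h]
  obtain ⟨b, bs, hm⟩ : ∃ b bs, natBounds ls = b :: bs := by
    unfold natBounds
    cases natStarts ls with
    | nil => exact ⟨_, _, rfl⟩
    | cons x t => exact ⟨_, _, rfl⟩
  have hb0 : b = natH0 ls := by
    unfold natBounds at hm
    unfold natH0
    cases hs : natStarts ls with
    | nil => rw [hs] at hm; simp at hm; simp [hm.1]
    | cons x t => rw [hs] at hm; simp at hm; simp [hm.1]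
  unfold natChunks
  rw [hb, hm, List.map_cons, List.tail_cons, List.zip_cons_cons, List.map_cons]
  have h2 := zip_tail_map (fun x => x + 1) (b :: bs)
  simp only [List.map_cons, List.tail_cons] at h2
  rw [h2, chunk_shift, ← hm, hm, List.tail_cons]
  simp [hb0]

lemma blocksFrom_chunks (ls : List String) : ∀ cur : List String,
    specBlocksFrom cur ls = (cur ++ ls.take (natH0 ls)) :: natChunks ls := by
  induction ls with
  | nil => intro cur; simp [specBlocksFrom, natH0, natStarts, natChunks, natBounds]
  | cons l ls ih =>
    intro cur
    by_cases hp : pvLineP l = true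
    · rw [specBlocksFrom, if_pos hp, ih [l], natChunks_cons_pos l ls hp]
      have : natH0 (l :: ls) = 0 := by simp [natH0, natStarts, hp]
      simp [this]
    · rw [specBlocksFrom, if_neg hp, ih (cur ++ [l]), natChunks_cons_neg l ls hp]
      have : natH0 (l :: ls) = natH0 ls + 1 := by
        unfold natH0
        cases hs : natStarts ls with
        | nil => simp [natStarts, hp, hs]
        | cons x t => simp [natStarts, hp, hs]
      simp [this]

lemma chunks_blocks (ls : List String) : natChunks ls = specBlocks ls := by
  induction ls with
  | nil => simp [natChunks, natBounds, natStarts, specBlocks]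
  | cons l ls ih =>
    by_cases hp : pvLineP l = true
    · rw [natChunks_cons_pos l ls hp, specBlocks, if_pos hp, blocksFrom_chunks ls [l]]
      simp
    · rw [natChunks_cons_neg l ls hp, specBlocks, if_neg hp, ih]

lemma a_loop (ls : List String) : ∀ (diffs cur : List String), cur ≠ [] →
    pvFlush (ls.foldl pvStep (diffs, true, cur))
      = diffs ++ (specBlocksFrom cur ls).map (PySem.Str.join "\n") := by
  induction ls with
  | nil => intro diffs cur hcur; simp [pvFlush, specBlocksFrom, hcur]
  | cons l ls ih =>
    intro diffs cur hcur
    by_cases hp : pvLineP l = true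
    · rw [List.foldl_cons, show pvStep (diffs, true, cur) l
          = (diffs ++ [PySem.Str.join "\n" cur], true, [l]) by simp [pvStep, hp, hcur],
        ih _ [l] (by simp), specBlocksFrom, if_pos hp]
      simp
    · rw [List.foldl_cons, show pvStep (diffs, true, cur) l
          = (diffs, true, cur ++ [l]) by simp [pvStep, hp],
        ih diffs (cur ++ [l]) (by simp), specBlocksFrom, if_neg hp]

lemma a_top (ls : List String) :
    pvFlush (ls.foldl pvStep ([], false, []))
      = (specBlocks ls).map (PySem.Str.join "\n") := by
  induction ls with
  | nil => simp [pvFlush, specBlocks]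
  | cons l ls ih =>
    by_cases hp : pvLineP l = true
    · rw [List.foldl_cons, show pvStep ([], false, []) l = ([], true, [l]) by simp [pvStep, hp],
        a_loop ls [] [l] (by simp), specBlocks, if_pos hp]
      simp
    · rw [List.foldl_cons, show pvStep ([], false, []) l = ([], false, []) by simp [pvStep, hp],
        ih, specBlocks, if_neg hp]

lemma starts_shift (ls : List String) (k : Int) :
    ((PySem.List.enumerate ls k).filter (fun q => pvLineP q.2)).map (·.1)
      = (natStarts ls).map (fun (n : Nat) => (n : Int) + k) := by
  induction ls generalizing k with
  | nil => rfl
  | cons l ls ih =>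
    rw [show PySem.List.enumerate (l :: ls) k = (k, l) :: PySem.List.enumerate ls (k + 1) from rfl,
        natStarts]
    by_cases hp : pvLineP l = true
    · simp only [hp, List.filter_cons, ite_true, List.map_cons, ih (k + 1), List.map_map]
      refine congrArg₂ _ (by push_cast; ring) ?_
      refine (List.map_congr_left fun n _ => ?_)
      simp only [Function.comp_apply]; push_cast; ring
    · simp only [hp, List.filter_cons, ite_false, Bool.false_eq_true, ih (k + 1), List.map_map]
      refine (List.map_congr_left fun n _ => ?_)
      simp only [Function.comp_apply]; push_cast; ring

lemma starts_cast (ls : List String) :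
    pvStarts ls = (natStarts ls).map (fun (n : Nat) => (n : Int)) := by
  unfold pvStarts
  have h := starts_shift ls 0
  rw [show PySem.List.enumerate ls = PySem.List.enumerate ls 0 from rfl, h]
  exact List.map_congr_left fun n _ => by ring

lemma bounds_cast (ls : List String) :
    pvBounds ls = (natBounds ls).map (fun (n : Nat) => (n : Int)) := by
  unfold pvBounds natBounds
  rw [starts_cast]
  simp [PySem.List.len_eq]

lemma b_eq (output : String) :
    extract_diffs_py_alt output
      = PySem.Str.join "\n\n" ((specBlocks (pvLines output)).map (PySem.Str.join "\n")) := by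
  unfold extract_diffs_py_alt
  rw [PySem.List.slice_from_one, bounds_cast, zip_tail_map, List.map_map, ← chunks_blocks]
  unfold natChunks
  rw [List.map_map]
  refine congrArg _ (List.map_congr_left fun q _ => ?_)
  simp [Function.comp, PySem.List.slice_natCast]

-- ===== VERDICT (by name: the statement is the Claim_ definition above) =====
theorem extract_diffs_py_spec : Claim_equal_extract_diffs_py := by
  intro output _
  unfold Spec_extract_diffs_py
  rw [b_eq, extract_diffs_py, a_top]
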